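-- pv_equiv track=rewrite | github.com/dysen/words | boggle.py | is_valid_diagonal
-- ===== SOURCE A (Python) =====
-- def check_if_axis_valid(axis):
--     path_length = len(axis)
--     if path_length <= 2:
--         return False
--     is_axes_valid = True
--     if axis[path_length - 1] < axis[0]:
--         axis = list(reversed(axis))
--     for i in range(path_length):
--         if i < path_length - 1:
--             if axis[i + 1] > axis[i] and axis[i + 1] - axis[i] == 1:
--                 continue
--             else:
--                 is_axes_valid = False
--                 break
--     return is_axes_valid
--
-- def is_valid_diagonal(path):
--     axis_x = list([s[0] for s in path])
--     axis_y = list([s[1] for s in path])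
--     a = check_if_axis_valid(axis_x)
--     if not a:
--         return False
--     b = check_if_axis_valid(axis_y)
--     return a and b
-- ===== SOURCE B (Python) =====
-- def is_valid_diagonal(path):
--     if len(path) <= 2:
--         return False
--     dx = [b[0] - a[0] for a, b in zip(path, path[1:])]
--     dy = [b[1] - a[1] for a, b in zip(path, path[1:])]
--     unit_run = lambda ds: all(d == 1 for d in ds) or all(d == -1 for d in ds)
--     return unit_run(dx) and unit_run(dy)
-- ===== Notes on version B (the rewrite author's own statement) =====
-- stated objective: simpler
-- what changed: Replaces the reverse-if-descending-then-index-loop-with-break helper by a direct symmetric test: the consecutive differences of each axis must be all +1 or all -1.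
import Mathlib
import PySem

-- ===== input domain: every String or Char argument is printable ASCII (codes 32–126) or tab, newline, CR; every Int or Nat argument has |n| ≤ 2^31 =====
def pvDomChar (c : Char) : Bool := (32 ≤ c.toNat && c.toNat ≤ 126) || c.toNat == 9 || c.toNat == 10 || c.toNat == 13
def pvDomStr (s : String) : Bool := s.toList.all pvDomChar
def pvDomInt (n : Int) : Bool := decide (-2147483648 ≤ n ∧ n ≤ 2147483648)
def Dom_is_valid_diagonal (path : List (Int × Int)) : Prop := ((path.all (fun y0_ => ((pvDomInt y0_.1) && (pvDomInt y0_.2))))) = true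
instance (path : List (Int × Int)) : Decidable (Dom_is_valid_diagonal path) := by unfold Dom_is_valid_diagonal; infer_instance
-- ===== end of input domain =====

-- B replaces A's reverse-if-descending index loop by a symmetric "all consecutive differences are +1 or all are -1" test (simpler decomposition, same cost).


-- ===== PORT A =====
-- the for-i-in-range loop with break: recursion over the remaining index list, stopping (false) at the first bad step
def checkAxisLoop (axis : List Int) (n : Int) : List Int → Bool
  | [] => true
  | i :: rest =>
    if i < n - 1 then
      if PySem.List.pyGetD axis (i + 1) 0 > PySem.List.pyGetD axis i 0
         && PySem.List.pyGetD axis (i + 1) 0 - PySem.List.pyGetD axis i 0 == 1 then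
        checkAxisLoop axis n rest
      else
        false
    else
      checkAxisLoop axis n rest

def check_if_axis_valid (axis : List Int) : Bool :=
  let n : Int := axis.length
  if n ≤ 2 then false
  else
    -- all loop indices are in range, so pyGetD with default 0 is exact for axis[i]
    let axis2 := if PySem.List.pyGetD axis (n - 1) 0 < PySem.List.pyGetD axis 0 0 then axis.reverse else axis
    checkAxisLoop axis2 n (PySem.List.pyRange 0 n 1)

def is_valid_diagonal (path : List (Int × Int)) : Bool :=
  let axis_x := path.map Prod.fst
  let axis_y := path.map Prod.snd
  let a := check_if_axis_valid axis_x
  if !a then false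
  else
    let b := check_if_axis_valid axis_y
    a && b

-- ===== PORT B =====
def unitRun (ds : List Int) : Bool := ds.all (· == 1) || ds.all (· == -1)

def is_valid_diagonal_alt (path : List (Int × Int)) : Bool :=
  if path.length ≤ 2 then false
  else
    let dx := (path.zip (path.drop 1)).map (fun ab => ab.2.1 - ab.1.1)
    let dy := (path.zip (path.drop 1)).map (fun ab => ab.2.2 - ab.1.2)
    unitRun dx && unitRun dy

-- ===== PRECONDITION & SPEC =====
def Spec_is_valid_diagonal (path : List (Int × Int)) (out : Bool) : Prop := out = is_valid_diagonal_alt path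
instance (path : List (Int × Int)) (out : Bool) : Decidable (Spec_is_valid_diagonal path out) := by unfold Spec_is_valid_diagonal; infer_instance

-- ===== CLAIM (what is proved, stated in full; the proofs are below) =====
def Claim_equal_is_valid_diagonal : Prop := ∀ (path : List (Int × Int)), Dom_is_valid_diagonal path → Spec_is_valid_diagonal path (is_valid_diagonal path)

-- ===== LEMMAS AND PROOFS =====

-- consecutive differences of a list
def diffs : List Int → List Int
  | a :: b :: t => (b - a) :: diffs (b :: t)
  | _ => []

lemma diffs_eq_zip (xs : List Int) :
    diffs xs = (xs.zip (xs.drop 1)).map (fun p => p.2 - p.1) := by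
  match xs with
  | [] => simp [diffs]
  | [a] => simp [diffs]
  | a :: b :: t => simp [diffs, diffs_eq_zip (b :: t)]

lemma loop_eq_all_one (xs : List Int) (k : Nat) (hk : k ≤ xs.length) :
    checkAxisLoop xs (xs.length : Int) (PySem.List.pyRange (k : Int) (xs.length : Int) 1)
      = (diffs (xs.drop k)).all (· == 1) := by
  by_cases h : k < xs.length
  · rw [PySem.List.pyRange_one_cons (by exact_mod_cast h)]
    by_cases h2 : k + 1 < xs.length
    · have hdrop : xs.drop k = xs[k] :: xs[k + 1] :: xs.drop (k + 2) := by
        rw [List.drop_eq_getElem_cons h, List.drop_eq_getElem_cons h2]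
      have e1 : PySem.List.pyGetD xs ((k : Int) + 1) 0 = xs[k + 1] := by
        rw [PySem.List.pyGetD_of_nonneg xs 0 (by omega),
          show ((k : Int) + 1).toNat = k + 1 from by omega, List.getD_eq_getElem xs 0 h2]
      have e0 : PySem.List.pyGetD xs (k : Int) 0 = xs[k] := by
        rw [PySem.List.pyGetD_of_nonneg xs 0 (by omega),
          show ((k : Int)).toNat = k from by omega, List.getD_eq_getElem xs 0 h]
      have hcond : ((k : Int) < (xs.length : Int) - 1) := by omega
      simp only [checkAxisLoop, if_pos hcond, e0, e1]
      have ih := loop_eq_all_one xs (k + 1) (by omega)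
      rw [show ((k : Int) + 1) = ((k + 1 : Nat) : Int) by push_cast; ring, ih, hdrop,
        List.drop_eq_getElem_cons h2]
      by_cases hd : xs[k + 1] - xs[k] = 1
      · have : xs[k + 1] > xs[k] := by omega
        simp [diffs, hd, this]
      · have : ¬ (xs[k + 1] > xs[k] ∧ xs[k + 1] - xs[k] = 1) := by tauto
        simp only [diffs, List.all_cons]
        rw [if_neg (by simpa [Bool.and_eq_true, decide_eq_true_iff] using this)]
        simp [hd]
    · have hk1 : k + 1 = xs.length := by omega
      have hcond : ¬ ((k : Int) < (xs.length : Int) - 1) := by omega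
      simp only [checkAxisLoop, if_neg hcond]
      have ih := loop_eq_all_one xs (k + 1) (by omega)
      rw [show ((k : Int) + 1) = ((k + 1 : Nat) : Int) by push_cast; ring, ih]
      rw [List.drop_eq_getElem_cons h]
      have : xs.drop (k + 1) = [] := by simp [hk1]
      simp [this, diffs]
  · have hk' : k = xs.length := by omega
    subst hk'
    simp [PySem.List.pyRange, checkAxisLoop, diffs]
termination_by xs.length - k

lemma diffs_append (xs : List Int) (a : Int) :
    diffs (xs ++ [a]) = diffs xs ++ (match xs.getLast? with
      | some l => [a - l] | none => []) := by
  match xs with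
  | [] => simp [diffs]
  | [x] => simp [diffs]
  | x :: y :: t =>
    have := diffs_append (y :: t) a
    simp only [List.cons_append, diffs] at this ⊢
    rw [this, List.getLast?_cons_cons]

lemma diffs_reverse (xs : List Int) :
    diffs xs.reverse = ((diffs xs).map Neg.neg).reverse := by
  induction xs with
  | nil => simp [diffs]
  | cons x t ih =>
    rw [List.reverse_cons, diffs_append, ih, List.getLast?_reverse]
    cases t with
    | nil => simp [diffs]
    | cons b t' => simp [diffs]

lemma last_of_all_one (a : Int) (t : List Int) (h : (diffs (a :: t)).all (· == 1) = true) :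
    (a :: t).getLast? = some (a + t.length) := by
  induction t generalizing a with
  | nil => simp
  | cons b t ih =>
    simp only [diffs, List.all_cons, Bool.and_eq_true, beq_iff_eq] at h
    have := ih b h.2
    rw [List.getLast?_cons_cons, this]
    norm_num; omega

lemma last_of_all_neg_one (a : Int) (t : List Int) (h : (diffs (a :: t)).all (· == -1) = true) :
    (a :: t).getLast? = some (a - t.length) := by
  induction t generalizing a with
  | nil => simp
  | cons b t ih =>
    simp only [diffs, List.all_cons, Bool.and_eq_true, beq_iff_eq] at h
    have := ih b h.2
    rw [List.getLast?_cons_cons, this]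
    norm_num; omega

lemma all_map_neg_one (l : List Int) :
    (l.map Neg.neg).all (· == 1) = l.all (· == -1) := by
  induction l with
  | nil => rfl
  | cons d t ih =>
    simp only [List.map_cons, List.all_cons, ih]
    rcases eq_or_ne d (-1) with h | h
    · simp [h]
    · have h1 : ((-d : Int) == 1) = false := by simpa using (show -d ≠ 1 from by omega)
      have h2 : ((d : Int) == -1) = false := by simpa using h
      rw [h1, h2]

lemma check_eq_unitRun (xs : List Int) :
    check_if_axis_valid xs = (decide (2 < xs.length) && unitRun (diffs xs)) := by
  unfold check_if_axis_valid
  by_cases hl : (xs.length : Int) ≤ 2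
  · rw [if_pos hl]
    simp [show ¬ 2 < xs.length from by omega]
  · have h3 : 3 ≤ xs.length := by omega
    rw [if_neg hl]
    obtain ⟨a, t, rfl⟩ : ∃ a t, xs = a :: t := by
      cases xs with
      | nil => simp at h3
      | cons a t => exact ⟨a, t, rfl⟩
    have hhead : PySem.List.pyGetD (a :: t) (0 : Int) 0 = a := by
      rw [PySem.List.pyGetD_of_nonneg _ _ (by omega)]; rfl
    have hlast : PySem.List.pyGetD (a :: t) (((a :: t).length : Int) - 1) 0
        = (a :: t).getLast?.getD 0 := by
      rw [PySem.List.pyGetD_of_nonneg _ _ (by rw [List.length_cons]; push_cast; omega),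
        show ((((a :: t).length : Int)) - 1).toNat = t.length from by simp,
        List.getD_eq_getElem?_getD, List.getLast?_eq_getElem?]
      simp
    have hL : 2 ≤ t.length := by simp at h3; omega
    rw [hhead, hlast]
    have hdec : decide (2 < (a :: t).length) = true := by simp; omega
    by_cases hrev : (a :: t).getLast?.getD 0 < a
    · rw [if_pos hrev]
      have hloop := loop_eq_all_one (a :: t).reverse 0 (by omega)
      simp only [List.length_reverse, Nat.cast_zero, List.drop_zero] at hloop
      rw [hloop, diffs_reverse, List.all_reverse, all_map_neg_one]
      have h1 : (diffs (a :: t)).all (· == 1) = false := by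
        by_contra hc
        have h1' : (diffs (a :: t)).all (· == 1) = true := by
          cases hh : (diffs (a :: t)).all (· == 1) <;> simp [hh] at hc ⊢
        have := last_of_all_one a t h1'
        rw [this] at hrev
        simp only [Option.getD_some] at hrev; omega
      rw [hdec, unitRun, h1]
      simp
    · rw [if_neg hrev]
      have hloop := loop_eq_all_one (a :: t) 0 (by omega)
      simp only [Nat.cast_zero, List.drop_zero] at hloop
      rw [hloop]
      have h1 : (diffs (a :: t)).all (· == -1) = false := by
        by_contra hc
        have h1' : (diffs (a :: t)).all (· == -1) = true := by
          cases hh : (diffs (a :: t)).all (· == -1) <;> simp [hh] at hc ⊢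
        have := last_of_all_neg_one a t h1'
        rw [this] at hrev
        simp only [Option.getD_some] at hrev; omega
      rw [hdec, unitRun, h1]
      simp

-- ===== VERDICT (by name: the statement is the Claim_ definition above) =====
lemma diffs_map_fst (path : List (Int × Int)) :
    diffs (path.map Prod.fst) = (path.zip (path.drop 1)).map (fun ab => ab.2.1 - ab.1.1) := by
  rw [diffs_eq_zip]
  rw [show (path.map Prod.fst).drop 1 = (path.drop 1).map Prod.fst from (List.map_drop ..).symm]
  rw [List.zip_map]
  simp [List.map_map, Function.comp, Prod.map]

lemma diffs_map_snd (path : List (Int × Int)) :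
    diffs (path.map Prod.snd) = (path.zip (path.drop 1)).map (fun ab => ab.2.2 - ab.1.2) := by
  rw [diffs_eq_zip]
  rw [show (path.map Prod.snd).drop 1 = (path.drop 1).map Prod.snd from (List.map_drop ..).symm]
  rw [List.zip_map]
  simp [List.map_map, Function.comp, Prod.map]

theorem is_valid_diagonal_spec : Claim_equal_is_valid_diagonal := by
  intro path _
  unfold Spec_is_valid_diagonal is_valid_diagonal is_valid_diagonal_alt
  simp only [check_eq_unitRun, List.length_map, diffs_map_fst, diffs_map_snd]
  by_cases hlen : path.length ≤ 2
  · simp [hlen, show ¬ 2 < path.length from by omega]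
  · rw [if_neg hlen]
    simp only [show (2 < path.length) from by omega, decide_true, Bool.true_and]
    cases hx : unitRun ((path.zip (path.drop 1)).map (fun ab => ab.2.1 - ab.1.1)) <;> simp
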